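-- pv_equiv track=rewrite | github.com/azennto/patrolling | src/hist_maze_road.py | count_apparent_paths
-- ===== SOURCE A (Python) =====
-- def count_apparent_paths(maze):
--     """
--     見かけ上の道の本数をカウントする関数
--     :param maze: 迷路を表す2次元リスト
--     :return: 見かけ上の道の本数
--     """
--     rows = len(maze)
--     cols = len(maze[0])
--     apparent_paths = 0
--
--     # 各行を調査
--     for i in range(rows):
--         j = 0
--         while j < cols:
--             if maze[i][j].isdigit():
--                 count = 0
--                 # 道を発見したら右方向に進み続ける
--                 while j < cols and maze[i][j].isdigit():
--                     count += 1
--                     j += 1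
--                 if count > 1:
--                     apparent_paths += 1
--             j += 1
--
--     # 各列を調査
--     for j in range(cols):
--         i = 0
--         while i < rows:
--             if maze[i][j].isdigit():
--                 count = 0
--                 # 道を発見したら下方向に進み続ける
--                 while i < rows and maze[i][j].isdigit():
--                     count += 1
--                     i += 1
--                 if count > 1:
--                     apparent_paths += 1
--             i += 1
--
--     return apparent_paths
-- ===== SOURCE B (Python) =====
-- def count_apparent_paths(maze):
--     """
--     見かけ上の道の本数をカウントする関数 (flat single pass: count run starts)
--     :param maze: 迷路を表す2次元リスト
--     :return: 見かけ上の道の本数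
--     """
--     rows = len(maze)
--     cols = len(maze[0])
--     total = 0
--     # a horizontal run of length > 1 is counted at its leftmost cell
--     for i in range(rows):
--         for j in range(cols):
--             if (maze[i][j].isdigit()
--                     and (j == 0 or not maze[i][j - 1].isdigit())
--                     and j + 1 < cols and maze[i][j + 1].isdigit()):
--                 total += 1
--     # a vertical run of length > 1 is counted at its topmost cell
--     for j in range(cols):
--         for i in range(rows):
--             if (maze[i][j].isdigit()
--                     and (i == 0 or not maze[i - 1][j].isdigit())
--                     and i + 1 < rows and maze[i + 1][j].isdigit()):
--                 total += 1
--     return total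
-- ===== Notes on version B (the rewrite author's own statement) =====
-- stated objective: simpler
-- what changed: Replaces A's pointer-advancing nested while loops (which walk to the end of each run and count its length) with a flat pass that counts each maximal run of length > 1 once, at its first cell, via constant-time neighbor checks.
import Mathlib
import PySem

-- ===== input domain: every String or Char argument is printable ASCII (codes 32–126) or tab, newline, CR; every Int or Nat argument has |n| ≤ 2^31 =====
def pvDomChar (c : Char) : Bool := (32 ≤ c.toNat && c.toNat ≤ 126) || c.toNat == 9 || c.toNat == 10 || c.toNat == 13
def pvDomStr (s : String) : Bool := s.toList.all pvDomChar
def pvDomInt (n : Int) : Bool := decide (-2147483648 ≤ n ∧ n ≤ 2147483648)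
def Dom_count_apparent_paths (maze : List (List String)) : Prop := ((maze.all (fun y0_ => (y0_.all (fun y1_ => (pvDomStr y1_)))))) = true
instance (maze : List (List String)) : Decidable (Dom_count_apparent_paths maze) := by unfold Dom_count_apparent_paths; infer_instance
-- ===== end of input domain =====

-- B replaces A's pointer-advancing inner while loops with a flat neighbor-check pass
-- counting each maximal digit run of length > 1 at its first cell (objective: simpler).

-- ===== PORT A =====
-- maze[i][j].isdigit(); pyGetD defaults are only reached outside Pre_ (where Python raises IndexError)
def pvDigitAt (maze : List (List String)) (i j : Nat) : Bool :=
  PySem.Str.strIsdigit (PySem.List.pyGetD (PySem.List.pyGetD maze (i : Int) []) (j : Int) "")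

-- inner 'while j < c and d(j): count += 1; j += 1', returning (count, j).
-- fuel-style structural recursion: fuel starts at c and always satisfies c - j <= fuel,
-- so the fuel-0 branch is only reached once j >= c (where the while loop exits anyway)
def pvRunA (d : Nat → Bool) (c fuel j cnt : Nat) : Nat × Nat :=
  match fuel with
  | 0 => (cnt, j)
  | fuel + 1 =>
    if j < c then
      if d j then pvRunA d c fuel (j + 1) (cnt + 1) else (cnt, j)
    else (cnt, j)

-- outer 'j = 0; while j < c: ...; j += 1' scan of one line (same fuel discipline)
def pvLoopA (d : Nat → Bool) (c fuel j : Nat) (acc : Int) : Int :=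
  match fuel with
  | 0 => acc
  | fuel + 1 =>
    if j < c then
      if d j then
        let p := pvRunA d c c j 0
        pvLoopA d c fuel (p.2 + 1) (if p.1 > 1 then acc + 1 else acc)
      else pvLoopA d c fuel (j + 1) acc
    else acc

def count_apparent_paths (maze : List (List String)) : Int :=
  let rows := maze.length
  let cols := (PySem.List.pyGetD maze 0 []).length
  let hor := (List.range rows).foldl
    (fun acc i => pvLoopA (fun j => pvDigitAt maze i j) cols cols 0 acc) 0
  (List.range cols).foldl
    (fun acc j => pvLoopA (fun i => pvDigitAt maze i j) rows rows 0 acc) hor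

-- ===== PORT B =====
-- 'd(j) and (j == 0 or not d(j-1)) and j+1 < c and d(j+1)'
def pvStart (d : Nat → Bool) (c j : Nat) : Bool :=
  d j && (j == 0 || !d (j - 1)) && decide (j + 1 < c) && d (j + 1)

def count_apparent_paths_alt (maze : List (List String)) : Int :=
  let rows := maze.length
  let cols := (PySem.List.pyGetD maze 0 []).length
  let total := (List.range rows).foldl (fun acc i =>
    (List.range cols).foldl (fun a j =>
      if pvStart (fun k => pvDigitAt maze i k) cols j then a + 1 else a) acc) 0
  (List.range cols).foldl (fun acc j =>
    (List.range rows).foldl (fun a i =>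
      if pvStart (fun k => pvDigitAt maze k j) rows i then a + 1 else a) acc) total

-- ===== PRECONDITION & SPEC =====
-- Pre_ excludes exactly the inputs where the Python raises IndexError: an empty maze
-- (maze[0]) and mazes whose some row is shorter than the first row (maze[i][j], j < cols).
def Pre_count_apparent_paths (maze : List (List String)) : Prop :=
  maze ≠ [] ∧ ∀ row ∈ maze, (maze.headI).length ≤ row.length

instance (maze : List (List String)) : Decidable (Pre_count_apparent_paths maze) := by
  unfold Pre_count_apparent_paths; infer_instance

def pvWitness_count_apparent_paths : List (List String) := [["1", "2"], ["a", "3"]]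

def Spec_count_apparent_paths (maze : List (List String)) (out : Int) : Prop := out = count_apparent_paths_alt maze
instance (maze : List (List String)) (out : Int) : Decidable (Spec_count_apparent_paths maze out) := by unfold Spec_count_apparent_paths; infer_instance

-- ===== CLAIM (what is proved, stated in full; the proofs are below) =====
def Claim_equal_count_apparent_paths : Prop := ∀ (maze : List (List String)), Dom_count_apparent_paths maze → Pre_count_apparent_paths maze → Spec_count_apparent_paths maze (count_apparent_paths maze)

-- ===== LEMMAS AND PROOFS =====

-- length of the maximal digit run starting at j (within [0, c))
def pvRunLen (d : Nat → Bool) (c j : Nat) : Nat :=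
  if _h : j < c then (if d j then pvRunLen d c (j + 1) + 1 else 0) else 0
termination_by c - j
decreasing_by omega

theorem pvRunLen_stop_le (d : Nat → Bool) (c : Nat) :
    ∀ n j, c - j ≤ n →
      (j + pvRunLen d c j < c → d (j + pvRunLen d c j) = false) ∧
      (∀ k, j ≤ k → k < j + pvRunLen d c j → d k = true) := by
  intro n
  induction n with
  | zero =>
      intro j h
      rw [pvRunLen]
      have hjc : ¬ j < c := by omega
      simp [hjc]
      intro hlt; omega
  | succ n ih =>
      intro j h
      rw [pvRunLen]
      by_cases hjc : j < c
      · by_cases hd : d j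
        · simp only [hjc, hd, dif_pos, if_pos]
          obtain ⟨hstop, hmem⟩ := ih (j + 1) (by omega)
          constructor
          · intro hlt
            have : j + 1 + pvRunLen d c (j + 1) = j + (pvRunLen d c (j + 1) + 1) := by omega
            rw [← this]; exact hstop (by omega)
          · intro k hk1 hk2
            rcases Nat.eq_or_lt_of_le hk1 with rfl | hk
            · exact hd
            · exact hmem k (by omega) (by omega)
        · simp [hjc, hd]; intro; omega
      · simp [hjc]; intro; omega

theorem pvRunLen_pos (d : Nat → Bool) {c j : Nat} (hjc : j < c) (hd : d j = true) :
    pvRunLen d c j = pvRunLen d c (j + 1) + 1 := by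
  rw [pvRunLen]; simp [hjc, hd]

theorem pvRunLen_pos_iff (d : Nat → Bool) (c j : Nat) :
    0 < pvRunLen d c j ↔ (j < c ∧ d j = true) := by
  rw [pvRunLen]
  by_cases hjc : j < c
  · by_cases hd : d j <;> simp [hjc, hd]
  · simp [hjc]

theorem pvRunA_spec (d : Nat → Bool) (c : Nat) :
    ∀ fuel j cnt, c - j ≤ fuel →
      pvRunA d c fuel j cnt = (cnt + pvRunLen d c j, j + pvRunLen d c j) := by
  intro fuel
  induction fuel with
  | zero =>
      intro j cnt h
      have hjc : ¬ j < c := by omega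
      rw [pvRunA, pvRunLen]
      simp [hjc]
  | succ fuel ih =>
      intro j cnt h
      rw [pvRunA]
      by_cases hjc : j < c
      · by_cases hd : d j
        · rw [if_pos hjc, if_pos hd, ih (j + 1) (cnt + 1) (by omega),
            pvRunLen_pos d hjc hd]
          simp only [Prod.mk.injEq]
          omega
        · rw [if_pos hjc, if_neg hd, pvRunLen]
          simp [hjc, Bool.of_not_eq_true hd]
      · rw [if_neg hjc, pvRunLen]
        simp [hjc]

-- number of run starts (B's count) in [j, c)
def pvCount (d : Nat → Bool) (c j : Nat) : Nat :=
  (List.range' j (c - j)).countP (fun k => pvStart d c k)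

theorem pvCount_stop (d : Nat → Bool) {c j : Nat} (h : c ≤ j) : pvCount d c j = 0 := by
  unfold pvCount
  rw [Nat.sub_eq_zero_of_le h]
  simp

theorem pvCount_peel (d : Nat → Bool) {c j : Nat} (h : j < c) :
    pvCount d c j = (if pvStart d c j then 1 else 0) + pvCount d c (j + 1) := by
  unfold pvCount
  have h1 : c - j = (c - (j + 1)) + 1 := by omega
  rw [h1, List.range'_succ, List.countP_cons]
  split <;> omega

theorem pvCount_skip (d : Nat → Bool) (c : Nat) :
    ∀ n a b, b - a ≤ n → a ≤ b →
      (∀ k, a ≤ k → k < b → pvStart d c k = false) → pvCount d c a = pvCount d c b := by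
  intro n
  induction n with
  | zero => intro a b h1 h2 _; have : a = b := by omega
            rw [this]
  | succ n ih =>
      intro a b h1 h2 hf
      rcases Nat.eq_or_lt_of_le h2 with rfl | hab
      · rfl
      · by_cases hac : a < c
        · rw [pvCount_peel d hac, hf a (le_refl a) hab]
          rw [if_neg (by decide)]
          have := ih (a + 1) b (by omega) (by omega) (fun k hk1 hk2 => hf k (by omega) hk2)
          omega
        · rw [pvCount_stop d (by omega), pvCount_stop d (by omega)]

theorem pvLoopA_eq_count (d : Nat → Bool) (c : Nat) :
    ∀ fuel j acc, c - j ≤ fuel → (j = 0 ∨ c ≤ j ∨ d (j - 1) = false) →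
      pvLoopA d c fuel j acc = acc + (pvCount d c j : Int) := by
  intro fuel
  induction fuel with
  | zero =>
      intro j acc h _
      rw [pvLoopA, pvCount_stop d (by omega)]
      simp
  | succ fuel ih =>
      intro j acc h hfresh
      rw [pvLoopA]
      by_cases hjc : j < c
      · by_cases hd : d j
        · rw [if_pos hjc, if_pos hd]
          set m := pvRunLen d c j with hm
          have hrun : pvRunA d c c j 0 = (m, j + m) := by
            rw [pvRunA_spec d c c j 0 (by omega)]
            simp [hm]
          have hm1 : 1 ≤ m := by
            have := (pvRunLen_pos_iff d c j).2 ⟨hjc, hd⟩; omega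
          obtain ⟨hstop, hmem⟩ := pvRunLen_stop_le d c (c - j) j (le_refl _)
          -- the recursive call's position is fresh
          have hfresh' : j + m + 1 = 0 ∨ c ≤ j + m + 1 ∨ d (j + m + 1 - 1) = false := by
            by_cases hmc : j + m < c
            · right; right
              have : j + m + 1 - 1 = j + m := by omega
              rw [this]; exact hstop hmc
            · right; left; omega
          have hIH := ih (j + m + 1) (if m > 1 then acc + 1 else acc) (by omega) hfresh'
          simp only [hrun]
          rw [hIH]
          -- relate pvCount j to pvCount (j + m + 1)
          have hskip : pvCount d c (j + 1) = pvCount d c (j + m + 1) := by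
            apply pvCount_skip d c (m + 1) (j + 1) (j + m + 1) (by omega) (by omega)
            intro k hk1 hk2
            have hdk1 : d (k - 1) = true := hmem (k - 1) (by omega) (by omega)
            unfold pvStart
            have hk0 : (k == 0) = false := by simp; omega
            have : k - 1 + 1 = k := by omega
            simp [hk0, hdk1]
          have hstartj : pvStart d c j = decide (m > 1) := by
            unfold pvStart
            have hmid : (j == 0 || !d (j - 1)) = true := by
              rcases hfresh with h0 | hc | hdf
              · simp [h0]
              · omega
              · simp [hdf]
            have h2iff : m > 1 ↔ (j + 1 < c ∧ d (j + 1) = true) := by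
              rw [hm, pvRunLen_pos d hjc hd]
              constructor
              · intro hgt
                exact (pvRunLen_pos_iff d c (j + 1)).1 (by omega)
              · intro hand
                have := (pvRunLen_pos_iff d c (j + 1)).2 hand; omega
            by_cases hg : m > 1
            · obtain ⟨ha, hb⟩ := h2iff.1 hg
              simp [hd, hmid, ha, hb, hg]
            · simp only [hg, decide_false]
              by_cases ha : j + 1 < c
              · have hb : d (j + 1) = false := by
                  by_cases hb' : d (j + 1)
                  · exact absurd (h2iff.2 ⟨ha, hb'⟩) hg
                  · simpa using hb'
                simp [hb]
              · simp [ha]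
          rw [pvCount_peel d hjc, hstartj, hskip]
          simp only [decide_eq_true_eq]
          split_ifs with hg <;> push_cast <;> ring
        · rw [if_pos hjc, if_neg hd]
          have hIH := ih (j + 1) acc (by omega) (by right; right; simpa using hd)
          rw [hIH, pvCount_peel d hjc]
          have : pvStart d c j = false := by unfold pvStart; simp [Bool.of_not_eq_true hd]
          simp [this]
      · rw [if_neg hjc, pvCount_stop d (by omega)]
        simp

-- one line: A's while-scan equals B's flat start-count
theorem line_eq (d : Nat → Bool) (c : Nat) (acc : Int) :
    pvLoopA d c c 0 acc =
      (List.range c).foldl (fun a j => if pvStart d c j then a + 1 else a) acc := by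
  rw [PySem.List.foldl_if_add_one]
  rw [pvLoopA_eq_count d c c 0 acc (by omega) (Or.inl rfl)]
  unfold pvCount
  rw [Nat.sub_zero, List.range_eq_range']

-- ===== VERDICT (by name: the statement is the Claim_ definition above) =====
theorem count_apparent_paths_spec : Claim_equal_count_apparent_paths := by
  unfold Claim_equal_count_apparent_paths
  intro maze _ _
  unfold Spec_count_apparent_paths
  unfold count_apparent_paths count_apparent_paths_alt
  have h1 : (fun (acc : Int) i => pvLoopA (fun j => pvDigitAt maze i j)
      (PySem.List.pyGetD maze 0 []).length (PySem.List.pyGetD maze 0 []).length 0 acc) =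
      (fun acc i => (List.range (PySem.List.pyGetD maze 0 []).length).foldl
        (fun a j => if pvStart (fun k => pvDigitAt maze i k)
          (PySem.List.pyGetD maze 0 []).length j then a + 1 else a) acc) := by
    funext acc i; exact line_eq _ _ acc
  have h2 : (fun (acc : Int) j => pvLoopA (fun i => pvDigitAt maze i j) maze.length maze.length 0 acc) =
      (fun acc j => (List.range maze.length).foldl
        (fun a i => if pvStart (fun k => pvDigitAt maze k j) maze.length i
          then a + 1 else a) acc) := by
    funext acc j; exact line_eq _ _ acc
  simp only [h1, h2]
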